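-- pv_equiv track=rewrite | github.com/HeadHunter483/msu-ling | Syntax/Codes/python/morph.py | adj_morph
-- ===== SOURCE A (Python) =====
-- def adj_morph(string):
--     str5=""
--     word = string.split()
--     mas=[]
--     mas2=[]
--
--     for current_word in word:
--         mas.append(current_word.lower())
--
--     while(len(mas2)!=6):
--         mas2.append("-")
--
--     for s in mas:
--         if (s=='nom' or s=='gen' or s=='dat' or s=='acc' or s=='ins' or s=='loc'):
--             mas2[1]=s
--         if (s=='sg' or s=='pl'):
--             mas2[2]=s
--         if (s=='plen' or s=='brev'):
--             mas2[3]=s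
--         if (s=='f' or s=='m' or s=='n'):
--             mas2[4]=s
--         if (s=='inan' or s=='anim'):
--             mas2[5]=s
--
--     i=0
--     for i in range(len(mas2)):
--         str5=str5+' '+mas2[i]
--
--     return str5
--
-- i=0
-- ===== SOURCE B (Python) =====
-- _CATS = [('nom', 'gen', 'dat', 'acc', 'ins', 'loc'),
--          ('sg', 'pl'),
--          ('plen', 'brev'),
--          ('f', 'm', 'n'),
--          ('inan', 'anim')]
--
-- def adj_morph(string):
--     # Per-slot backward search: each slot is the LAST token of its category,
--     # found independently by scanning the tokens right-to-left; no mutable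
--     # slot array, no per-token dispatch.
--     toks = [t.lower() for t in string.split()]
--     def last_of(cat):
--         return next((t for t in reversed(toks) if t in cat), '-')
--     return ' -' + ''.join(' ' + last_of(c) for c in _CATS)
-- ===== Notes on version B (the rewrite author's own statement) =====
-- stated objective: alternative
-- what changed: Instead of A's single forward pass writing tokens into a mutable six-slot list via five if-chains, B computes each output slot independently by a right-to-left search (next over reversed tokens) for the last token of that slot's category, with no slot array at all.
import Mathlib
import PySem

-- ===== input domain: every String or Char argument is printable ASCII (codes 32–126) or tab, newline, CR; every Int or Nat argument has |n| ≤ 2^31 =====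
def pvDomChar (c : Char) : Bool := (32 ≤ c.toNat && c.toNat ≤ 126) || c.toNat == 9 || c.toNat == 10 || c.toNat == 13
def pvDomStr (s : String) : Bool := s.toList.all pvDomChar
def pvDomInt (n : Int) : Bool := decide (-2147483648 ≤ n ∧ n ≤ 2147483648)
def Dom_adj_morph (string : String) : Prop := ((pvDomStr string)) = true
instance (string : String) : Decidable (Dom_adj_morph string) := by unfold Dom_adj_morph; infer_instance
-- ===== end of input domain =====

-- B replaces A's token loop writing into a mutable six-slot list with an independent
-- right-to-left search per slot (last matching token wins by construction); objective: alternative.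

-- ===== PORT A =====
-- fuel-bounded transliteration of A's 'while len(mas2)!=6: mas2.append("-")' (6 iterations suffice from the empty start)
def adjFillA : Nat → List String → List String
  | 0, mas2 => mas2
  | fuel+1, mas2 => if mas2.length ≠ 6 then adjFillA fuel (mas2 ++ ["-"]) else mas2

-- body of A's 'for s in mas' loop: five independent ifs, each writing its slot
def adjStepA (mas2 : List String) (s : String) : List String :=
  let m1 := if s = "nom" ∨ s = "gen" ∨ s = "dat" ∨ s = "acc" ∨ s = "ins" ∨ s = "loc" then PySem.List.pySetD mas2 1 s else mas2
  let m2 := if s = "sg" ∨ s = "pl" then PySem.List.pySetD m1 2 s else m1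
  let m3 := if s = "plen" ∨ s = "brev" then PySem.List.pySetD m2 3 s else m2
  let m4 := if s = "f" ∨ s = "m" ∨ s = "n" then PySem.List.pySetD m3 4 s else m3
  if s = "inan" ∨ s = "anim" then PySem.List.pySetD m4 5 s else m4

def adj_morph (string : String) : String :=
  let word := PySem.Str.split₀ string
  let mas := word.foldl (fun acc w => acc ++ [PySem.Str.lower w]) []
  let mas2 := adjFillA 6 []
  let mas2 := mas.foldl adjStepA mas2
  (PySem.List.pyRange 0 (mas2.length : Int) 1).foldl
    (fun str5 i => str5 ++ " " ++ PySem.List.pyGetD mas2 i "") ""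

-- ===== PORT B =====
def cat1 : List String := ["nom", "gen", "dat", "acc", "ins", "loc"]
def cat2 : List String := ["sg", "pl"]
def cat3 : List String := ["plen", "brev"]
def cat4 : List String := ["f", "m", "n"]
def cat5 : List String := ["inan", "anim"]
def adjCats : List (List String) := [cat1, cat2, cat3, cat4, cat5]

-- Source B's last_of: first element of reversed(toks) lying in cat, default '-'
def adjLastOf (toks : List String) (cat : List String) : String :=
  (toks.reverse.find? (fun t => cat.contains t)).getD "-"

def adj_morph_alt (string : String) : String :=
  let toks := (PySem.Str.split₀ string).map PySem.Str.lower
  " -" ++ PySem.Str.join "" (adjCats.map (fun c => " " ++ adjLastOf toks c))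

-- ===== PRECONDITION & SPEC =====
def Spec_adj_morph (string : String) (out : String) : Prop := out = adj_morph_alt string
instance (string : String) (out : String) : Decidable (Spec_adj_morph string out) := by unfold Spec_adj_morph; infer_instance

-- ===== CLAIM (what is proved, stated in full; the proofs are below) =====
def Claim_equal_adj_morph : Prop := ∀ (string : String), Dom_adj_morph string → Spec_adj_morph string (adj_morph string)

-- ===== LEMMAS AND PROOFS =====

lemma adjFillA_six : adjFillA 6 [] = ["-", "-", "-", "-", "-", "-"] := by rfl

-- A's five-if step written out as one slot update per category
lemma adjStepA_explicit (z a b c d e s : String) :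
    adjStepA [z, a, b, c, d, e] s =
      [z,
       if s ∈ cat1 then s else a,
       if s ∈ cat2 then s else b,
       if s ∈ cat3 then s else c,
       if s ∈ cat4 then s else d,
       if s ∈ cat5 then s else e] := by
  simp only [adjStepA, cat1, cat2, cat3, cat4, cat5, List.mem_cons, List.not_mem_nil, or_false]
  split_ifs <;> simp_all [PySem.List.pySetD, PySem.List.pySet?, PySem.List.pyIdx?]

-- the right fold a single category performs
def adjFoldLast (cat : List String) (toks : List String) (v : String) : String :=
  toks.foldl (fun v s => if s ∈ cat then s else v) v

lemma foldl_adjStepA (toks : List String) (z a b c d e : String) :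
    toks.foldl adjStepA [z, a, b, c, d, e] =
      [z, adjFoldLast cat1 toks a, adjFoldLast cat2 toks b,
          adjFoldLast cat3 toks c, adjFoldLast cat4 toks d,
          adjFoldLast cat5 toks e] := by
  induction toks generalizing a b c d e with
  | nil => rfl
  | cons s rest ih =>
    simp only [List.foldl_cons, adjStepA_explicit, ih]
    rfl

lemma adjFoldLast_eq_lastOf (cat : List String) (toks : List String) (v : String) :
    adjFoldLast cat toks v = (toks.reverse.find? (fun t => cat.contains t)).getD v := by
  induction toks generalizing v with
  | nil => rfl
  | cons s rest ih =>
    simp only [adjFoldLast, List.foldl_cons] at *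
    rw [ih, List.reverse_cons, List.find?_append]
    cases h : rest.reverse.find? (fun t => cat.contains t) <;>
      (simp [List.find?]; try (split_ifs with hm <;> simp_all))

-- final assembly: A's space-concatenation of the six slots equals B's " -" ++ join
lemma assemble_eq (v1 v2 v3 v4 v5 : String) :
    (["-", v1, v2, v3, v4, v5].foldl (fun a x => a ++ " " ++ x) "") =
      " -" ++ PySem.Str.join "" [" " ++ v1, " " ++ v2, " " ++ v3, " " ++ v4, " " ++ v5] := by
  apply String.toList_injective
  simp [PySem.Str.toList_join, PySem.Chars.join, List.intercalate, List.intersperse]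

-- ===== VERDICT (by name: the statement is the Claim_ definition above) =====
theorem adj_morph_spec : Claim_equal_adj_morph := by
  intro string _
  unfold Spec_adj_morph
  simp only [adj_morph, adj_morph_alt]
  rw [PySem.List.foldl_append_singleton_eq_map, List.nil_append, adjFillA_six,
    foldl_adjStepA]
  rw [PySem.List.foldl_pyRange_zero_pyGetD'
    ["-", adjFoldLast cat1 ((PySem.Str.split₀ string).map PySem.Str.lower) "-",
          adjFoldLast cat2 ((PySem.Str.split₀ string).map PySem.Str.lower) "-",
          adjFoldLast cat3 ((PySem.Str.split₀ string).map PySem.Str.lower) "-",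
          adjFoldLast cat4 ((PySem.Str.split₀ string).map PySem.Str.lower) "-",
          adjFoldLast cat5 ((PySem.Str.split₀ string).map PySem.Str.lower) "-"]
    "" (fun a x => a ++ " " ++ x) ""]
  rw [assemble_eq]
  simp only [adjCats, List.map_cons, List.map_nil, adjLastOf, adjFoldLast_eq_lastOf]
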